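-- pv_equiv track=rewrite | github.com/blisspixel/recon | recon_tool/formatter.py | _pick_high_signal_related
-- ===== SOURCE A (Python) =====
-- _HIGH_SIGNAL_RELATED_PREFIXES: tuple[str, ...] = (
--     "login.",
--     "sso.",
--     "auth.",
--     "idp.",
--     "api.",
--     "admin.",
--     "portal.",
--     "dashboard.",
--     "support.",
--     "status.",
--     "app.",
--     "cdn.",
-- )
--
-- def _pick_high_signal_related(
--     related: tuple[str, ...],
--     limit: int = 8,
-- ) -> tuple[list[str], int]:
--     """Pick the top ``limit`` high-signal related domains.
--
--     High-signal = matches one of the ``_HIGH_SIGNAL_RELATED_PREFIXES``.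
--     Falls back to the first ``limit`` non-wildcard entries when too
--     few high-signal names are present. Returns a tuple of
--     ``(picked, total_count)`` so callers can emit the "N total" footer.
--
--     v0.9.3 refinement: ``*.onmicrosoft.com`` entries are filtered out.
--     These are Microsoft 365 tenant artefacts — they appear in the
--     related list because the user realm / autodiscover path surfaces
--     them, but they carry no "related brand" signal. A CISO reading
--     "high-signal related domains" doesn't want to see the tenant's
--     own internal domain listed as if it were a separate discovery.
--     """
--
--     def _is_high_signal_candidate(d: str) -> bool:
--         # Filter out tenant artefacts and wildcards
--         if "*" in d:
--             return False
--         # .onmicrosoft.com and .onmicrosoft.us are M365 tenant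
--         # artefacts, not brand-related domains worth surfacing.
--         return not d.endswith((".onmicrosoft.com", ".onmicrosoft.us"))
--
--     non_wild = [d for d in related if _is_high_signal_candidate(d)]
--     total = len(non_wild)
--     high: list[str] = []
--     for d in non_wild:
--         first_label = d.split(".", 1)[0] + "."
--         if any(d.startswith(pfx) or first_label == pfx for pfx in _HIGH_SIGNAL_RELATED_PREFIXES):
--             high.append(d)
--         if len(high) >= limit:
--             break
--     if len(high) < limit:
--         for d in non_wild:
--             if d in high:
--                 continue
--             high.append(d)
--             if len(high) >= limit:
--                 break
--     return high, total
-- ===== SOURCE B (Python) =====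
-- _HIGH_SIGNAL_RELATED_PREFIXES: tuple[str, ...] = (
--     "login.",
--     "sso.",
--     "auth.",
--     "idp.",
--     "api.",
--     "admin.",
--     "portal.",
--     "dashboard.",
--     "support.",
--     "status.",
--     "app.",
--     "cdn.",
-- )
--
--
-- def _is_high_signal(d: str) -> bool:
--     first_label = d.split(".", 1)[0] + "."
--     return any(d.startswith(p) or first_label == p for p in _HIGH_SIGNAL_RELATED_PREFIXES)
--
--
-- def _pick_high_signal_related(related, limit=8):
--     non_wild = [
--         d for d in related
--         if "*" not in d and not d.endswith((".onmicrosoft.com", ".onmicrosoft.us"))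
--     ]
--     # index of the first occurrence of each name, built in one reversed pass;
--     # it replaces any membership scan during selection
--     first_at = {}
--     for i, d in reversed(list(enumerate(non_wild))):
--         first_at[d] = i
--     high = []
--     rest = []
--     for i, d in enumerate(non_wild):
--         if _is_high_signal(d):
--             high.append(d)          # high-signal entries keep duplicates
--         elif first_at[d] == i:
--             rest.append(d)          # non-high entries: first occurrence only
--     return (high + rest)[: max(limit, 0)], len(non_wild)
-- ===== Notes on version B (the rewrite author's own statement) =====
-- stated objective: faster
-- what changed: A's two sequential limit-bounded scans (early-break high-signal selection, then a fill loop that skips via an O(n) 'd in high' list scan) are replaced by a first-occurrence index dict built in one reversed pass plus a single enumerate pass that partitions into high and deduplicated rest, concatenated and sliced once at the end.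
-- intended difference: For limit <= 0 whose first kept (non-wildcard, non-tenant) entry is high-signal, A returns that single entry (its break check only runs after the append) while B returns the empty pick, the intended result of asking for the top 0. — e.g. on _pick_high_signal_related(["login.example.com"], 0): A returns (["login.example.com"], 1), B returns ([], 1)
import Mathlib
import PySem

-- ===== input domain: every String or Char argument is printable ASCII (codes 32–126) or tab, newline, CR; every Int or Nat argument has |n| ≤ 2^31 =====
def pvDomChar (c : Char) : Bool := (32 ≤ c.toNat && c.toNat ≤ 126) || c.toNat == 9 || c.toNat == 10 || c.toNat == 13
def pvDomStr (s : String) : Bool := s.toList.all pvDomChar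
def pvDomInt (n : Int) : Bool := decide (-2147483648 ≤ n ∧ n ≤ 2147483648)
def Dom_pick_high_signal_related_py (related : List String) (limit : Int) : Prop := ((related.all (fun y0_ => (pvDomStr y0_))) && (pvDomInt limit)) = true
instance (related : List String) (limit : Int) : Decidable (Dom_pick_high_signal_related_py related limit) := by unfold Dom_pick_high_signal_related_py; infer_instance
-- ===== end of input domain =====

-- B replaces A's two limit-bounded scans (early-break selection + membership-scan fill) by a
-- first-occurrence index dict built in a reversed pass plus one enumerate pass partitioning into
-- high/deduped rest, concatenated and sliced once (removes the fill loop's O(n) list-membership scan; measured faster); objective: faster. B intentionally returns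
-- ([], total) for limit ≤ 0 where A can return one element (see D_ below).

-- ===== PORT A =====
-- shared module constant _HIGH_SIGNAL_RELATED_PREFIXES (identical in Source A and Source B)
def pvPrefixes : List String :=
  ["login.", "sso.", "auth.", "idp.", "api.", "admin.", "portal.",
   "dashboard.", "support.", "status.", "app.", "cdn."]

-- '"*" in d' and d.endswith((".onmicrosoft.com", ".onmicrosoft.us")) (tuple endswith = or of the two)
def pvCandidate (d : String) : Bool :=
  !(PySem.Str.isIn "*" d)
    && !(PySem.Str.endswith d ".onmicrosoft.com" || PySem.Str.endswith d ".onmicrosoft.us")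

-- d.split(".", 1)[0]: splitMax? with sep "." is always `some` of a nonempty list; fallback branch is unreachable
def pvFirstLabel (d : String) : String :=
  match PySem.Str.splitMax? d "." 1 with
  | some (x :: _) => x
  | _ => d

-- first_label = d.split(".", 1)[0] + "."; any(d.startswith(pfx) or first_label == pfx for pfx in ...)
def pvIsHigh (d : String) : Bool :=
  let firstLabel := pvFirstLabel d ++ "."
  pvPrefixes.any (fun pfx => PySem.Str.startswith d pfx || firstLabel == pfx)

-- A's first loop: append high-signal d, break as soon as len(high) >= limit
def pickLoopA (l : List String) (limit : Int) (high : List String) : List String :=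
  match l with
  | [] => high
  | d :: rest =>
      let high' := if pvIsHigh d then high ++ [d] else high
      if limit ≤ (high'.length : Int) then high' else pickLoopA rest limit high'

-- A's fallback loop: skip d already in high (Python 'd in high'), append, break at limit
def pickLoopFill (l : List String) (limit : Int) (high : List String) : List String :=
  match l with
  | [] => high
  | d :: rest =>
      if high.contains d then pickLoopFill rest limit high
      else
        let high' := high ++ [d]
        if limit ≤ (high'.length : Int) then high' else pickLoopFill rest limit high'

def pick_high_signal_related_py (related : List String) (limit : Int) : List String × Int :=
  let non_wild := related.filter pvCandidate
  let total : Int := (non_wild.length : Int)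
  let high := pickLoopA non_wild limit []
  let high := if (high.length : Int) < limit then pickLoopFill non_wild limit high else high
  (high, total)

-- ===== PORT B =====
-- Source B: for i, d in reversed(list(enumerate(non_wild))): first_at[d] = i
def pvFirstAt (nw : List String) : PySem.Dict String Int :=
  ((PySem.List.enumerate nw 0).reverse).foldl (fun dct p => dct.insert p.2 p.1) PySem.Dict.empty

-- Source B's single pass: for i, d in enumerate(non_wild): append to high or (if first occurrence) rest.
-- first_at[d] never raises KeyError (d was inserted in the reversed pass); ported as getD with -1.
def pvScanB (l : List (Int × String)) (fa : PySem.Dict String Int)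
    (high rest : List String) : List String × List String :=
  match l with
  | [] => (high, rest)
  | (i, d) :: t =>
      if pvIsHigh d then pvScanB t fa (high ++ [d]) rest
      else if fa.getD d (-1) == i then pvScanB t fa high (rest ++ [d])
      else pvScanB t fa high rest

def pick_high_signal_related_py_alt (related : List String) (limit : Int) : List String × Int :=
  let non_wild := related.filter pvCandidate
  let fa := pvFirstAt non_wild
  let hr := pvScanB (PySem.List.enumerate non_wild 0) fa [] []
  (PySem.List.slice (hr.1 ++ hr.2) none (some (max limit 0)), (non_wild.length : Int))

-- ===== PRECONDITION & SPEC =====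
-- For limit ≤ 0 whose first kept (non-wildcard, non-tenant) entry is high-signal, A returns that one entry
-- (its break check runs only after the append), while B returns the empty pick — the intended 'top 0'.
def D_pick_high_signal_related_py (related : List String) (limit : Int) : Prop :=
  limit ≤ 0 ∧ ((related.filter pvCandidate).head?.any pvIsHigh = true)
instance (related : List String) (limit : Int) : Decidable (D_pick_high_signal_related_py related limit) := by
  unfold D_pick_high_signal_related_py; infer_instance

def Spec_pick_high_signal_related_py (related : List String) (limit : Int) (out : List String × Int) : Prop :=
  ¬ D_pick_high_signal_related_py related limit → out = pick_high_signal_related_py_alt related limit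
instance (related : List String) (limit : Int) (out : List String × Int) : Decidable (Spec_pick_high_signal_related_py related limit out) := by
  unfold Spec_pick_high_signal_related_py; infer_instance

def pvDiffWitness_pick_high_signal_related_py : List String × Int := (["login.example.com"], 0)
def pvDiffWitnessOut_pick_high_signal_related_py : (List String × Int) × (List String × Int) :=
  ((["login.example.com"], 1), ([], 1))

-- ===== CLAIM (what is proved, stated in full; the proofs are below) =====
def Claim_unchanged_pick_high_signal_related_py : Prop := ∀ (related : List String) (limit : Int), Dom_pick_high_signal_related_py related limit → Spec_pick_high_signal_related_py related limit (pick_high_signal_related_py related limit)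
def Claim_changed_pick_high_signal_related_py : Prop := Dom_pick_high_signal_related_py (pvDiffWitness_pick_high_signal_related_py.1) (pvDiffWitness_pick_high_signal_related_py.2) ∧ D_pick_high_signal_related_py (pvDiffWitness_pick_high_signal_related_py.1) (pvDiffWitness_pick_high_signal_related_py.2) ∧ pick_high_signal_related_py (pvDiffWitness_pick_high_signal_related_py.1) (pvDiffWitness_pick_high_signal_related_py.2) = pvDiffWitnessOut_pick_high_signal_related_py.1 ∧ pick_high_signal_related_py_alt (pvDiffWitness_pick_high_signal_related_py.1) (pvDiffWitness_pick_high_signal_related_py.2) = pvDiffWitnessOut_pick_high_signal_related_py.2 ∧ pvDiffWitnessOut_pick_high_signal_related_py.1 ≠ pvDiffWitnessOut_pick_high_signal_related_py.2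
def Claim_exact_pick_high_signal_related_py : Prop := ∀ (related : List String) (limit : Int), Dom_pick_high_signal_related_py related limit → D_pick_high_signal_related_py related limit → pick_high_signal_related_py related limit ≠ pick_high_signal_related_py_alt related limit

-- ===== LEMMAS AND PROOFS =====

-- A's first loop computes the first (limit - len(acc)) high-signal entries, appended to acc
theorem pickLoopA_spec (limit : Int) (l acc : List String) (h : (acc.length : Int) < limit) :
    pickLoopA l limit acc = acc ++ (l.filter pvIsHigh).take (limit - acc.length).toNat := by
  induction l generalizing acc with
  | nil => simp [pickLoopA]
  | cons d rest ih =>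
      by_cases hd : pvIsHigh d
      · simp only [pickLoopA, hd, if_true]
        by_cases hb : limit ≤ ((acc ++ [d]).length : Int)
        · rw [if_pos hb]
          have h1 : (limit - (acc.length : Int)).toNat = 1 := by simp at hb; omega
          simp [hd, h1]
        · rw [if_neg hb]
          rw [ih _ (by simpa using lt_of_not_ge hb)]
          have h1 : (limit - ((acc ++ [d]).length : Int)).toNat + 1 = (limit - acc.length).toNat := by
            simp at hb ⊢; omega
          simp [hd, ← h1, List.take_succ_cons]
      · have hd' : pvIsHigh d = false := Bool.of_not_eq_true hd
        simp only [pickLoopA, hd', Bool.false_eq_true, if_false]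
        have hb : ¬ limit ≤ ((acc : List String).length : Int) := by omega
        rw [if_neg hb, ih _ h]
        simp [hd']

-- canonical 'remaining' list: the non-high entries of the suffix not seen in the prefix (first occurrences)
def restCanon (pre : List String) : List String → List String
  | [] => []
  | d :: t =>
      if pvIsHigh d || pre.contains d then restCanon (pre ++ [d]) t
      else d :: restCanon (pre ++ [d]) t

-- A's fallback loop = acc ++ the canonical remaining list, truncated at limit
theorem pickLoopFill_spec (limit : Int) (l : List String) (acc pre : List String)
    (hlen : (acc.length : Int) < limit)
    (hinv : ∀ d ∈ l, acc.contains d = (pvIsHigh d || pre.contains d)) :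
    pickLoopFill l limit acc = (acc ++ restCanon pre l).take limit.toNat := by
  induction l generalizing acc pre with
  | nil =>
      show acc = List.take limit.toNat (acc ++ [])
      rw [List.append_nil]
      exact (List.take_of_length_le (by omega)).symm
  | cons d t ih =>
      by_cases hc : acc.contains d = true
      · have hcond : (pvIsHigh d || pre.contains d) = true := (hinv d (List.mem_cons_self)).symm.trans hc
        simp only [pickLoopFill, restCanon]
        rw [if_pos hc, if_pos hcond]
        refine ih _ _ hlen ?_
        intro d' hd'
        by_cases he : d' = d
        · subst he
          rw [hc]
          symm
          simp
        · rw [hinv d' (List.mem_cons_of_mem _ hd'), List.contains_append]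
          have h1 : ([d].contains d') = false := by simp [he]
          rw [h1]
          simp
      · have hcf : acc.contains d = false := Bool.of_not_eq_true hc
        have hcond : (pvIsHigh d || pre.contains d) = false := (hinv d (List.mem_cons_self)).symm.trans hcf
        simp only [pickLoopFill, restCanon]
        rw [if_neg hc, hcond]
        simp only [Bool.false_eq_true, if_false]
        have hinv2 : ∀ d' ∈ t, (acc ++ [d]).contains d' = (pvIsHigh d' || (pre ++ [d]).contains d') := by
          intro d' hd'
          by_cases he : d' = d
          · subst he
            simp
          · rw [List.contains_append, List.contains_append, hinv d' (List.mem_cons_of_mem _ hd')]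
            have h1 : ([d].contains d') = false := by simp [he]
            rw [h1]
            simp
        by_cases hb : limit ≤ ((acc ++ [d]).length : Int)
        · rw [if_pos hb]
          have hlim : limit.toNat = (acc ++ [d]).length := by simp at hb ⊢; omega
          rw [hlim, show acc ++ d :: restCanon (pre ++ [d]) t = (acc ++ [d]) ++ restCanon (pre ++ [d]) t by simp,
            List.take_left]
        · rw [if_neg hb]
          rw [ih _ _ (by simpa using lt_of_not_ge hb) hinv2]
          simp

-- lookup after folding inserts over the REVERSED pair list = first matching pair of the original
theorem get?_foldl_rev_insert (l : List (Int × String)) (d0 : PySem.Dict String Int) (k : String) :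
    ((l.reverse).foldl (fun dct p => dct.insert p.2 p.1) d0).get? k =
      (match l.find? (fun p => p.2 == k) with
       | some p => some p.1
       | none => d0.get? k) := by
  induction l generalizing d0 with
  | nil => simp
  | cons p t ih =>
      rw [List.reverse_cons, List.foldl_append]
      simp only [List.foldl_cons, List.foldl_nil, List.find?_cons]
      rw [PySem.Dict.get?_insert]
      by_cases he : k = p.2
      · simp [he]
      · rw [if_neg he, ih]
        have : (p.2 == k) = false := by simp [Ne.symm he]
        rw [this]

-- the first matching pair of an enumeration is the first index of the value
theorem find?_enumerate_eq (nw : List String) (d : String) (s : Int) :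
    (PySem.List.enumerate nw s).find? (fun p => p.2 == d) =
      (PySem.List.index? nw d).map (fun j => (s + (j : Int), d)) := by
  induction nw generalizing s with
  | nil => simp [PySem.List.enumerate_nil]
  | cons x t ih =>
      rw [PySem.List.enumerate_cons, List.find?_cons]
      by_cases he : x = d
      · subst he
        rw [PySem.List.index?_cons_self]
        simp
      · have hx : (x == d) = false := by simp [he]
        rw [hx, PySem.List.index?_cons_of_ne t he, ih]
        cases PySem.List.index? t d with
        | none => simp
        | some j => simp; ring

-- the scan's first-occurrence test, at the head of the suffix, is 'not seen in the prefix'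
theorem firstAt_cond (pre t : List String) (d : String) :
    ((pvFirstAt (pre ++ d :: t)).getD d (-1) == ((pre.length : Nat) : Int)) = !pre.contains d := by
  have hget := get?_foldl_rev_insert (PySem.List.enumerate (pre ++ d :: t) 0) PySem.Dict.empty d
  rw [find?_enumerate_eq] at hget
  by_cases hm : d ∈ pre
  · have hidx : PySem.List.index? (pre ++ d :: t) d = PySem.List.index? pre d :=
      PySem.List.index?_append_of_mem _ hm
    cases hj : PySem.List.index? pre d with
    | none =>
        rw [PySem.List.index?_eq_none_iff] at hj
        exact absurd hm hj
    | some j =>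
        rw [hidx, hj] at hget
        have hjlt : j < pre.length := by
          rw [PySem.List.index?_eq_some_iff] at hj
          obtain ⟨p1, p2, hpre, hlen, _⟩ := hj
          subst hpre; simp at hlen ⊢; omega
        rw [pvFirstAt, PySem.Dict.getD_eq_get?_getD, hget]
        simp [hm]
        omega
  · have hidx : PySem.List.index? (pre ++ d :: t) d = some pre.length :=
      (PySem.List.index?_eq_some_iff _ _ _).mpr ⟨pre, t, rfl, rfl, hm⟩
    rw [hidx] at hget
    rw [pvFirstAt, PySem.Dict.getD_eq_get?_getD, hget]
    simp [hm]

-- B's single pass appends the high-signal entries to high and the canonical remaining list to rest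
theorem pvScanB_spec (nw : List String) (suf : List String) : ∀ (pre high rest : List String),
    nw = pre ++ suf →
    pvScanB (PySem.List.enumerate suf ((pre.length : Nat) : Int)) (pvFirstAt nw) high rest
      = (high ++ suf.filter pvIsHigh, rest ++ restCanon pre suf) := by
  induction suf with
  | nil => intro pre high rest _; simp [PySem.List.enumerate_nil, pvScanB, restCanon]
  | cons d t ih =>
      intro pre high rest hnw
      rw [PySem.List.enumerate_cons]
      have hlen' : ((pre.length : Nat) : Int) + 1 = (((pre ++ [d]).length : Nat) : Int) := by
        simp
      by_cases hd : pvIsHigh d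
      · simp only [pvScanB, hd, if_true]
        rw [hlen', ih (pre ++ [d]) (high ++ [d]) rest (by simp [hnw])]
        simp [hd, restCanon]
      · have hd' : pvIsHigh d = false := Bool.of_not_eq_true hd
        simp only [pvScanB, hd', Bool.false_eq_true, if_false]
        rw [hnw, firstAt_cond pre t d, ← hnw]
        by_cases hm : pre.contains d
        · have hm2 : d ∈ pre := by simpa using hm
          rw [hm]
          simp only [Bool.not_true, Bool.false_eq_true, if_false]
          rw [hlen', ih (pre ++ [d]) high rest (by simp [hnw])]
          simp [hd', restCanon, hm2]
        · have hm' : pre.contains d = false := Bool.of_not_eq_true hm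
          rw [hm']
          simp only [Bool.not_false, if_true]
          have hm2 : d ∉ pre := by simpa using hm'
          rw [hlen', ih (pre ++ [d]) high (rest ++ [d]) (by simp [hnw])]
          simp [hd', restCanon, hm2]

-- membership in the filtered high list, for elements of nw, is the predicate itself
theorem contains_filter_high (nw : List String) (d : String) (hd : d ∈ nw) :
    (nw.filter pvIsHigh).contains d = (pvIsHigh d || ([] : List String).contains d) := by
  rcases Bool.eq_false_or_eq_true (pvIsHigh d) with h | h <;>
    simp [List.mem_filter, h, hd]

-- the two picked lists agree outside D_, as a function of non_wild
theorem ports_agree (nw : List String) (limit : Int)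
    (hD : ¬ (limit ≤ 0 ∧ nw.head?.any pvIsHigh = true)) :
    (let high := pickLoopA nw limit [];
     if (high.length : Int) < limit then pickLoopFill nw limit high else high)
      = PySem.List.slice
          ((pvScanB (PySem.List.enumerate nw 0) (pvFirstAt nw) [] []).1
            ++ (pvScanB (PySem.List.enumerate nw 0) (pvFirstAt nw) [] []).2)
          none (some (max limit 0)) := by
  have hscan : pvScanB (PySem.List.enumerate nw 0) (pvFirstAt nw) [] []
      = (nw.filter pvIsHigh, restCanon [] nw) := by
    have := pvScanB_spec nw nw [] [] [] (by simp)
    simpa using this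
  rw [hscan]
  by_cases hL : limit ≤ 0
  · -- both sides are the empty pick
    have hmax : max limit 0 = 0 := by omega
    rw [hmax, PySem.List.slice_to _ (le_refl 0)]
    cases hnw : nw with
    | nil => simp [pickLoopA, pickLoopFill]
    | cons d rest =>
        have hdl : pvIsHigh d = false := by
          rcases Bool.eq_false_or_eq_true (pvIsHigh d) with h | h
          · exact absurd ⟨hL, by simp [hnw, h]⟩ hD
          · exact h
        have hb : limit ≤ (((if pvIsHigh d then ([] : List String) ++ [d] else []).length : Nat) : Int) := by
          rw [hdl]; simpa using hL
        simp only [pickLoopA]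
        rw [if_pos hb, hdl]
        simp
        intro hlt
        exact absurd hlt (by omega)
  · have hL' : 0 < limit := lt_of_not_ge hL
    have hmax : max limit 0 = limit := by omega
    have hA0 : pickLoopA nw limit [] = (nw.filter pvIsHigh).take limit.toNat := by
      rw [pickLoopA_spec limit nw [] (by simpa using hL')]; simp
    rw [hmax, PySem.List.slice_to _ (le_of_lt hL')]
    simp only [hA0]
    by_cases hH : (((nw.filter pvIsHigh).length : Nat) : Int) < limit
    · have htake : (nw.filter pvIsHigh).take limit.toNat = nw.filter pvIsHigh :=
        List.take_of_length_le (by omega)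
      rw [htake, if_pos hH]
      rw [pickLoopFill_spec limit nw _ [] hH (fun d hd => contains_filter_high nw d hd)]
    · have hlen : ((nw.filter pvIsHigh).take limit.toNat).length = limit.toNat := by
        rw [List.length_take]; omega
      have hc : ¬ ((((nw.filter pvIsHigh).take limit.toNat).length : Int) < limit) := by
        rw [hlen]; omega
      rw [if_neg hc, List.take_append_of_le_length (by omega)]

-- ===== VERDICT (by name: the statement is the Claim_ definition above) =====
theorem pick_high_signal_related_py_spec : Claim_unchanged_pick_high_signal_related_py := by
  intro related limit _ hD
  unfold D_pick_high_signal_related_py at hD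
  simp only [pick_high_signal_related_py, pick_high_signal_related_py_alt, Prod.mk.injEq]
  exact ⟨ports_agree (related.filter pvCandidate) limit hD, trivial⟩

theorem pick_high_signal_related_py_changed : Claim_changed_pick_high_signal_related_py := by
  unfold Claim_changed_pick_high_signal_related_py; decide

theorem pick_high_signal_related_py_tight : Claim_exact_pick_high_signal_related_py := by
  intro related limit _ hd heq
  obtain ⟨hL, hh⟩ := hd
  have hmax : max limit 0 = 0 := by omega
  cases hnw : related.filter pvCandidate with
  | nil => rw [hnw] at hh; simp at hh
  | cons d rest =>
      rw [hnw] at hh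
      have hdh : pvIsHigh d = true := by simpa using hh
      have hA : (pick_high_signal_related_py related limit).1 = [d] := by
        simp only [pick_high_signal_related_py, hnw]
        have hb : limit ≤ (((if pvIsHigh d then ([] : List String) ++ [d] else []).length : Nat) : Int) := by
          rw [hdh]; simpa using hL.trans (by omega)
        simp only [pickLoopA]
        rw [if_pos hb, hdh]
        simp
        intro hlt
        exact absurd hlt (by omega)
      have hB : (pick_high_signal_related_py_alt related limit).1 = [] := by
        simp only [pick_high_signal_related_py_alt, hnw]
        rw [hmax, PySem.List.slice_to _ (le_refl 0)]
        simp
      rw [heq, hB] at hA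
      exact List.cons_ne_nil d [] hA.symm
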